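-- pv_equiv track=rewrite | github.com/sy1wi4/ASD-2020 | egzamin/zad2.py | opt_sum
-- ===== SOURCE A (Python) =====
-- def min_abs_val(a,b):
--     if abs(a) < abs(b) :
--         return a
--     else:
--         return b
--
-- def max_abs_val(a,b):
--     if abs(a) > abs(b) :
--         return a
--     else:
--         return b
--
-- def opt_sum(tab):
--     # aby mieć na bieżąco dostęp do sumy w danym przedziale tworzymy sobie
--     # pomocniczo tablicę sum prefixowych - wtedy suma [i,j] to pref[j+1] - pref[i]
--
--     n=len(tab)
--     prefix=[None]*(n+1)
--     prefix[0]=0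
--
--     for i in range(1,n+1):
--         prefix[i]=prefix[i-1] + tab[i-1]
--
--     memo=[[0]*n for _ in range(n)]
--     # w memo[i][j] zapamiętujemy wartość sumy tymczasowej, której wartość bezwzględna
--     # na danym przedziale jest minimalna (z maksymalnych)
--
--     # rozważamy coraz dłuższe przedziały
--     for length in range(1,n):
--
--         for start in range(n-length):
--             end = start + length
--
--             # na początek do memo wpisujemy sumę danego przedziału - wyliczoną za pomocą
--             # tablicy sum prefiksowych
--
--             memo[start][end] = prefix[end+1] - prefix[start]
--
--             # dla każdego przedziału sprawdzamy, które 2 podprzedziały najlepiej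
--             # dodać do siebie (tak, by max suma tymczasowa była jak najmniejsza)
--             # k jest "punktem podziału", bierzemy przedziały [start][k] oraz [k+1][end]
--
--             best = float("inf")
--
--             for k in range(start,end):
--                 best = min_abs_val(max_abs_val(memo[start][k], memo[k+1][end]), best)
--
--             # do memo wpisujemy wartość z najlepszego podziału lub sumę całego przedziału,
--             # jeśli jej wartość bezwzględna jest większa
--
--             memo[start][end]=max_abs_val(best,memo[start][end])
--
--     return abs(memo[0][n-1])
-- ===== SOURCE B (Python) =====
-- def opt_sum(tab):
--     # Top-down memoized recursion over intervals, working directly with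
--     # absolute values (only |value| ever influences A's comparisons and result).
--     n = len(tab)
--     prefix = [0]
--     s = 0
--     for x in tab:
--         s += x
--         prefix.append(s)
--     memo = {}
--
--     def solve(i, j):
--         if i == j:
--             return 0
--         if (i, j) in memo:
--             return memo[(i, j)]
--         best = min(max(solve(i, k), solve(k + 1, j)) for k in range(i, j))
--         res = max(best, abs(prefix[j + 1] - prefix[i]))
--         memo[(i, j)] = res
--         return res
--
--     return solve(0, n - 1)
-- ===== Notes on version B (the rewrite author's own statement) =====
-- stated objective: alternative
-- what changed: Replaces A's bottom-up length-by-length table fill over signed temporary sums (with abs-comparing helpers and a float-inf sentinel) by top-down memoized recursion over intervals that computes directly with absolute values.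
import Mathlib
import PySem

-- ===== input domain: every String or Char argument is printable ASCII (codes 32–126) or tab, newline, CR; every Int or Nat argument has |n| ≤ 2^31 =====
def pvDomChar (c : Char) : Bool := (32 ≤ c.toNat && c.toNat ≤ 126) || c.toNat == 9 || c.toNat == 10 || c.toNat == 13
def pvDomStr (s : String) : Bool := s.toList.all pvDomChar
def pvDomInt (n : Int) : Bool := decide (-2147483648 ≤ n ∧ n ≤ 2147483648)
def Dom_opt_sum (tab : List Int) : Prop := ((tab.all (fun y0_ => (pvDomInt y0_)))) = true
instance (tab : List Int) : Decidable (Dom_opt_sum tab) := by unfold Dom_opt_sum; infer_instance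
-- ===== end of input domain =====

-- B replaces A's bottom-up length-by-length DP table over signed temporary sums by
-- top-down memoized recursion on intervals computing directly with absolute values
-- (objective: alternative decomposition, same asymptotic cost).

-- ===== PORT A =====
def min_abs_val (a b : Int) : Int := if |a| < |b| then a else b

def max_abs_val (a b : Int) : Int := if |a| > |b| then a else b

-- memo[i][j] read / write (indices produced by the loops are always in range)
def pvGet2 (m : List (List Int)) (i j : Nat) : Int := (m.getD i []).getD j 0

def pvSet2 (m : List (List Int)) (i j : Nat) (v : Int) : List (List Int) :=
  m.set i ((m.getD i []).set j v)

-- Literal port of A.  Loop indices are nonnegative, so Python's range(a,b) is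
-- List.range' a (b-a) over Nat (exact).  The None placeholders of `prefix` are
-- modelled by 0: every cell is written before it is read.  `best = float("inf")`
-- is modelled by `none` (min_abs_val(c, inf) = c, the `none` branch); the final
-- match's `none` arm is unreachable since each length ≥ 1 makes the k-loop nonempty.
def opt_sum (tab : List Int) : Int :=
  let n := tab.length
  let pref := (List.range' 1 n).foldl
      (fun p i => p.set i (p.getD (i-1) 0 + tab.getD (i-1) 0))
      ((List.replicate (n+1) (0:Int)).set 0 0)
  let memo0 := List.replicate n (List.replicate n (0:Int))
  let memo := (List.range' 1 (n-1)).foldl (fun m len =>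
    (List.range' 0 (n - len)).foldl (fun m start =>
      let e := start + len
      let m1 := pvSet2 m start e (pref.getD (e+1) 0 - pref.getD start 0)
      let best := (List.range' start len).foldl (fun b k =>
        let c := max_abs_val (pvGet2 m1 start k) (pvGet2 m1 (k+1) e)
        match b with
        | none => some c
        | some b0 => some (min_abs_val c b0)) (none : Option Int)
      match best with
      | none => m1
      | some b0 => pvSet2 m1 start e (max_abs_val b0 (pvGet2 m1 start e))) m) memo0
  |pvGet2 memo 0 (n-1)|

-- ===== PORT B =====
-- Port of Source B's `solve`.  The Python memo dict only caches solve's own values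
-- (value-transparent), so the port is the same recursion, made total with a fuel
-- argument bounding the interval width (fuel ≥ j - i on every reachable call).
-- Python's min() over the nonempty generator is the head-seeded foldl min;
-- the [] arm (where Python's min would raise ValueError) is unreachable for i < j.
def solveB (pref : List Int) : Nat → Nat → Nat → Int
  | 0, _, _ => 0
  | fuel+1, i, j =>
    if i = j then 0
    else
      let cands := (List.range' i (j - i)).map (fun k =>
        max (solveB pref fuel i k) (solveB pref fuel (k+1) j))
      let best := match cands with
        | [] => 0
        | c :: cs => cs.foldl min c
      max best |pref.getD (j+1) 0 - pref.getD i 0|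

def opt_sum_alt (tab : List Int) : Int :=
  let pref := (tab.foldl (fun (ps : List Int × Int) x => (ps.1 ++ [ps.2 + x], ps.2 + x))
      (([0], 0) : List Int × Int)).1
  solveB pref (tab.length - 1) 0 (tab.length - 1)

-- ===== PRECONDITION & SPEC =====
-- On the empty list A raises IndexError (memo[0][-1] on an empty memo) and B's
-- min() raises ValueError, so Pre_ excludes exactly the empty list.
def Pre_opt_sum (tab : List Int) : Prop := tab ≠ []
instance (tab : List Int) : Decidable (Pre_opt_sum tab) := by unfold Pre_opt_sum; infer_instance

def pvWitness_opt_sum : List Int := [1, -2, 3]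

def Spec_opt_sum (tab : List Int) (out : Int) : Prop := out = opt_sum_alt tab
instance (tab : List Int) (out : Int) : Decidable (Spec_opt_sum tab out) := by unfold Spec_opt_sum; infer_instance

-- ===== CLAIM (what is proved, stated in full; the proofs are below) =====
def Claim_equal_opt_sum : Prop := ∀ (tab : List Int), Dom_opt_sum tab → Pre_opt_sum tab → Spec_opt_sum tab (opt_sum tab)

-- ===== LEMMAS AND PROOFS =====

theorem absMin (a b : Int) : |min_abs_val a b| = min |a| |b| := by
  unfold min_abs_val; split_ifs with h
  · exact (min_eq_left h.le).symm
  · exact (min_eq_right (not_lt.mp h)).symm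

theorem absMax (a b : Int) : |max_abs_val a b| = max |a| |b| := by
  unfold max_abs_val; split_ifs with h
  · exact (max_eq_left h.le).symm
  · exact (max_eq_right (not_lt.mp h)).symm

theorem foldl_range'_inv {α : Type} (f : α → Nat → α) (P : Nat → α → Prop) :
    ∀ (len s : Nat) (a : α), P s a →
      (∀ i b, s ≤ i → i < s + len → P i b → P (i+1) (f b i)) →
      P (s + len) ((List.range' s len).foldl f a) := by
  intro len
  induction len with
  | zero => intro s a h _; simpa using h
  | succ m ih =>
    intro s a h hstep
    rw [List.range'_succ]
    have h1 : P (s+1) (f a s) := hstep s a le_rfl (by omega) h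
    have := ih (s+1) (f a s) h1 (fun i b hi hi2 hb => hstep i b (by omega) (by omega) hb)
    simpa [Nat.add_comm, Nat.add_left_comm] using this

theorem solveB_fuel (pref : List Int) :
    ∀ (f1 f2 i j : Nat), i ≤ j → j - i ≤ f1 → j - i ≤ f2 →
      solveB pref f1 i j = solveB pref f2 i j := by
  intro f1
  induction f1 with
  | zero =>
    intro f2 i j hij h1 _
    have : i = j := by omega
    subst this
    cases f2 <;> simp [solveB]
  | succ a ih =>
    intro f2 i j hij h1 h2
    cases f2 with
    | zero =>
      have : i = j := by omega
      subst this; simp [solveB]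
    | succ b =>
      by_cases hij2 : i = j
      · subst hij2; simp [solveB]
      · simp only [solveB, if_neg hij2]
        have hm : (List.range' i (j - i)).map (fun k =>
            max (solveB pref a i k) (solveB pref a (k+1) j)) =
            (List.range' i (j - i)).map (fun k =>
            max (solveB pref b i k) (solveB pref b (k+1) j)) := by
          apply List.map_congr_left
          intro k hk
          obtain ⟨hk1, hk2⟩ := List.mem_range'_1.mp hk
          rw [ih b i k (by omega) (by omega) (by omega),
              ih b (k+1) j (by omega) (by omega) (by omega)]
        rw [hm]

def gS (pref : List Int) (i j : Nat) : Int := solveB pref (j - i) i j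

theorem gS_diag (pref : List Int) (i : Nat) : gS pref i i = 0 := by
  simp [gS, solveB]

theorem absFold (f : Nat → Int) (l : List Nat) :
    ∀ (b0 : Int), ∃ v, l.foldl (fun b k =>
        match b with
        | none => some (f k)
        | some b0 => some (min_abs_val (f k) b0)) (some b0) = some v ∧
      |v| = (l.map (fun k => |f k|)).foldl min |b0| := by
  induction l with
  | nil => intro b0; exact ⟨b0, rfl, rfl⟩
  | cons k ks ih =>
    intro b0
    obtain ⟨v, hv, habs⟩ := ih (min_abs_val (f k) b0)
    refine ⟨v, hv, ?_⟩
    rw [habs, absMin, min_comm]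
    simp

def Shape (n : Nat) (m : List (List Int)) : Prop :=
  m.length = n ∧ ∀ r ∈ m, r.length = n

theorem getD_set_self {α : Type} (l : List α) (i : Nat) (h : i < l.length) (v d : α) :
    (l.set i v).getD i d = v := by
  rw [List.getD_eq_getElem?_getD, List.getElem?_set_self h]; rfl

theorem getD_set_ne {α : Type} (l : List α) {i i' : Nat} (h : i ≠ i') (v d : α) :
    (l.set i v).getD i' d = l.getD i' d := by
  rw [List.getD_eq_getElem?_getD, List.getElem?_set_ne h, ← List.getD_eq_getElem?_getD]

theorem getD_mem {α : Type} (l : List α) {i : Nat} (h : i < l.length) (d : α) :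
    l.getD i d ∈ l := by
  rw [List.getD_eq_getElem?_getD, List.getElem?_eq_getElem h]
  exact List.getElem_mem h

theorem shape_set2 {n : Nat} {m : List (List Int)} (h : Shape n m) (i j : Nat) (v : Int)
    (hi : i < n) : Shape n (pvSet2 m i j v) := by
  obtain ⟨h1, h2⟩ := h
  refine ⟨by simp [pvSet2, h1], ?_⟩
  intro r hr
  rcases List.mem_or_eq_of_mem_set hr with h | h
  · exact h2 r h
  · subst h
    rw [List.length_set]
    exact h2 _ (getD_mem m (by omega) [])

theorem get2_set2_self {n : Nat} {m : List (List Int)} (h : Shape n m) {i j : Nat}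
    (hi : i < n) (hj : j < n) (v : Int) : pvGet2 (pvSet2 m i j v) i j = v := by
  obtain ⟨h1, h2⟩ := h
  have hrow : (m.getD i []).length = n := h2 _ (getD_mem m (by omega) [])
  unfold pvGet2 pvSet2
  rw [getD_set_self _ _ (by omega), getD_set_self _ _ (by omega)]

theorem get2_set2_ne {m : List (List Int)} {i j i' j' : Nat}
    (h : i ≠ i' ∨ j ≠ j') (v : Int) : pvGet2 (pvSet2 m i j v) i' j' = pvGet2 m i' j' := by
  unfold pvGet2 pvSet2
  by_cases hii : i = i'
  · subst hii
    have hjj : j ≠ j' := by tauto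
    rcases Nat.lt_or_ge i m.length with hlt | hge
    · rw [getD_set_self _ _ (by omega), getD_set_ne _ hjj]
    · rw [List.set_eq_of_length_le (by omega)]
  · rw [getD_set_ne _ hii]

def psumL (tab : List Int) : List Int := (List.range (tab.length+1)).map (fun i => (tab.take i).sum)

theorem getD_map_range (f : Nat → Int) {m i : Nat} (h : i < m) (d : Int) :
    ((List.range m).map f).getD i d = f i := by
  rw [List.getD_eq_getElem?_getD]; simp [h]

theorem set_append_len {α : Type} (A : List α) (x v : α) (B : List α) :
    (A ++ x :: B).set A.length v = A ++ v :: B := by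
  induction A with
  | nil => simp
  | cons a as ih => simp [ih]

theorem sum_take_succ (tab : List Int) {m : Nat} (h : m < tab.length) :
    (tab.take (m+1)).sum = (tab.take m).sum + tab.getD m 0 := by
  rw [List.take_add_one, List.getElem?_eq_getElem h, List.getD_eq_getElem?_getD,
    List.getElem?_eq_getElem h, List.sum_append]
  simp

theorem prefB_fold : ∀ (l p : List Int) (s : Int),
    l.foldl (fun (ps : List Int × Int) x => (ps.1 ++ [ps.2 + x], ps.2 + x)) (p, s) =
      (p ++ (List.range l.length).map (fun i => s + (l.take (i+1)).sum), s + l.sum) := by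
  intro l
  induction l with
  | nil => intro p s; simp
  | cons x xs ih =>
    intro p s
    simp only [List.foldl_cons]
    rw [ih]
    simp [List.range_succ_eq_map, List.map_map, Function.comp_def, add_assoc]

theorem prefB_eq (tab : List Int) :
    (tab.foldl (fun (ps : List Int × Int) x => (ps.1 ++ [ps.2 + x], ps.2 + x))
      (([0], 0) : List Int × Int)).1 = psumL tab := by
  rw [prefB_fold]
  simp [psumL, List.range_succ_eq_map, List.map_map, Function.comp_def]

theorem prefA_fold (tab : List Int) : ∀ (m : Nat), m ≤ tab.length →
    (List.range' 1 m).foldl (fun p i => p.set i (p.getD (i-1) 0 + tab.getD (i-1) 0))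
        ((List.replicate (tab.length+1) (0:Int)).set 0 0) =
      (List.range (m+1)).map (fun i => (tab.take i).sum) ++
        List.replicate (tab.length - m) (0:Int) := by
  intro m
  induction m with
  | zero =>
    intro _
    have : tab.length + 1 = 1 + tab.length := by omega
    simp [this, List.replicate_add]
  | succ m ih =>
    intro hm
    have e : 1 + m - 1 = m := by omega
    rw [List.range'_1_concat, List.foldl_append, ih (by omega)]
    simp only [List.foldl_cons, List.foldl_nil, e]
    have hgd : (((List.range (m+1)).map (fun i => (tab.take i).sum) ++
        List.replicate (tab.length - m) (0:Int))).getD m 0 = (tab.take m).sum := by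
      rw [List.getD_append _ _ _ _ (by simp), getD_map_range _ (by omega)]
    rw [hgd, ← sum_take_succ tab (by omega)]
    have hrep : List.replicate (tab.length - m) (0:Int) =
        0 :: List.replicate (tab.length - (m+1)) 0 := by
      have : tab.length - m = (tab.length - (m+1)) + 1 := by omega
      rw [this, List.replicate_succ]
    rw [hrep]
    have h1m : 1 + m = ((List.range (m+1)).map (fun i => (tab.take i).sum)).length := by
      simp; omega
    rw [h1m, set_append_len]
    simp [List.range_succ]

def InvO (n : Nat) (pref : List Int) (L : Nat) (m : List (List Int)) : Prop :=
  Shape n m ∧ ∀ i j, i ≤ j → j < n →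
    (j - i < L → |pvGet2 m i j| = gS pref i j) ∧ (L ≤ j - i → pvGet2 m i j = 0)

def InvI (n : Nat) (pref : List Int) (L s : Nat) (m : List (List Int)) : Prop :=
  Shape n m ∧ ∀ i j, i ≤ j → j < n →
    (j - i < L → |pvGet2 m i j| = gS pref i j) ∧
    (j - i = L → (i < s → |pvGet2 m i j| = gS pref i j) ∧ (s ≤ i → pvGet2 m i j = 0)) ∧
    (L < j - i → pvGet2 m i j = 0)

theorem inner_step (n : Nat) (pref : List Int) (L s : Nat) (m : List (List Int))
    (hL1 : 1 ≤ L) (hs : s < n - L) (h : InvI n pref L s m) :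
    InvI n pref L (s+1)
      ((fun m start =>
        let e := start + L
        let m1 := pvSet2 m start e (pref.getD (e+1) 0 - pref.getD start 0)
        let best := (List.range' start L).foldl (fun b k =>
          let c := max_abs_val (pvGet2 m1 start k) (pvGet2 m1 (k+1) e)
          match b with
          | none => some c
          | some b0 => some (min_abs_val c b0)) (none : Option Int)
        match best with
        | none => m1
        | some b0 => pvSet2 m1 start e (max_abs_val b0 (pvGet2 m1 start e))) m s) := by
  obtain ⟨hsh, hinv⟩ := h
  have he : s + L < n := by omega
  set e := s + L with hedef
  set sv := pref.getD (e+1) 0 - pref.getD s 0 with hsvdef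
  set m1 := pvSet2 m s e sv with hm1def
  have hsh1 : Shape n m1 := shape_set2 hsh _ _ _ (by omega)
  obtain ⟨L', rfl⟩ : ∃ L', L = L' + 1 := ⟨L-1, by omega⟩
  -- the k-loop result
  obtain ⟨b0, hb0, habs⟩ := absFold
    (fun k => max_abs_val (pvGet2 m1 s k) (pvGet2 m1 (k+1) e))
    (List.range' (s+1) L')
    (max_abs_val (pvGet2 m1 s s) (pvGet2 m1 (s+1) e))
  have hfold : (List.range' s (L'+1)).foldl (fun b k =>
      let c := max_abs_val (pvGet2 m1 s k) (pvGet2 m1 (k+1) e)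
      match b with
      | none => some c
      | some b0 => some (min_abs_val c b0)) (none : Option Int) = some b0 := by
    rw [List.range'_succ]
    simpa using hb0
  -- candidate absolute values
  have hcand : ∀ k, s ≤ k → k < e →
      |max_abs_val (pvGet2 m1 s k) (pvGet2 m1 (k+1) e)| =
        max (gS pref s k) (gS pref (k+1) e) := by
    intro k hk1 hk2
    have e1 : pvGet2 m1 s k = pvGet2 m s k := get2_set2_ne (Or.inr (by omega)) _
    have e2 : pvGet2 m1 (k+1) e = pvGet2 m (k+1) e := get2_set2_ne (Or.inl (by omega)) _
    rw [absMax, e1, e2,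
      ((hinv s k (by omega) (by omega)).1 (by omega)),
      ((hinv (k+1) e (by omega) (by omega)).1 (by omega))]
  -- value written at (s, e)
  have hread : pvGet2 m1 s e = sv := get2_set2_self hsh (by omega) (by omega) _
  have hval : |max_abs_val b0 (pvGet2 m1 s e)| = gS pref s e := by
    rw [absMax, hread]
    have hge : gS pref s e = solveB pref (L'+1) s e := by
      unfold gS; congr 1; omega
    rw [hge]
    have hne : s ≠ e := by omega
    simp only [solveB, if_neg hne]
    have hes : e - s = L' + 1 := by omega
    rw [hes, List.range'_succ]
    have hmapeq : (List.range' (s+1) L').map (fun k =>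
        max (solveB pref L' s k) (solveB pref L' (k+1) e)) =
        (List.range' (s+1) L').map (fun k =>
          |max_abs_val (pvGet2 m1 s k) (pvGet2 m1 (k+1) e)|) := by
      apply List.map_congr_left
      intro k hk
      obtain ⟨hk1, hk2⟩ := List.mem_range'_1.mp hk
      rw [hcand k (by omega) (by omega)]
      unfold gS
      rw [solveB_fuel pref L' (k - s) s k (by omega) (by omega) (by omega),
          solveB_fuel pref L' (e - (k+1)) (k+1) e (by omega) (by omega) (by omega)]
    have hhead : max (solveB pref L' s s) (solveB pref L' (s+1) e) =
        |max_abs_val (pvGet2 m1 s s) (pvGet2 m1 (s+1) e)| := by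
      rw [hcand s (by omega) (by omega)]
      unfold gS
      rw [solveB_fuel pref L' (s - s) s s (by omega) (by omega) (by omega),
          solveB_fuel pref L' (e - (s+1)) (s+1) e (by omega) (by omega) (by omega)]
    simp only [List.map_cons, hmapeq, hhead]
    rw [← habs]
  -- reduce the body
  have hbody : ((fun m start =>
      let e := start + (L'+1)
      let m1 := pvSet2 m start e (pref.getD (e+1) 0 - pref.getD start 0)
      let best := (List.range' start (L'+1)).foldl (fun b k =>
        let c := max_abs_val (pvGet2 m1 start k) (pvGet2 m1 (k+1) e)
        match b with
        | none => some c
        | some b0 => some (min_abs_val c b0)) (none : Option Int)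
      match best with
      | none => m1
      | some b0 => pvSet2 m1 start e (max_abs_val b0 (pvGet2 m1 start e))) m s) =
      pvSet2 m1 s e (max_abs_val b0 (pvGet2 m1 s e)) := by
    simp only [← hedef, ← hsvdef, ← hm1def, hfold]
  rw [hbody]
  refine ⟨shape_set2 hsh1 _ _ _ (by omega), ?_⟩
  intro i j hij hj
  by_cases hse : i = s ∧ j = e
  · have hw1 : j - i = L' + 1 := by omega
    have hv : pvGet2 (pvSet2 m1 s e (max_abs_val b0 (pvGet2 m1 s e))) i j =
        max_abs_val b0 (pvGet2 m1 s e) := by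
      rw [hse.1, hse.2]; exact get2_set2_self hsh1 (by omega) (by omega) _
    refine ⟨fun hw => absurd hw (by omega), fun _ => ⟨fun _ => ?_,
      fun hc => absurd hc (by omega)⟩, fun hw => absurd hw (by omega)⟩
    rw [hv, hse.1, hse.2]; exact hval
  · have hne : s ≠ i ∨ e ≠ j := by tauto
    have hunch : pvGet2 (pvSet2 m1 s e (max_abs_val b0 (pvGet2 m1 s e))) i j = pvGet2 m i j := by
      rw [get2_set2_ne hne _, hm1def, get2_set2_ne hne _]
    rw [hunch]
    obtain ⟨hA, hB, hC⟩ := hinv i j hij hj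
    refine ⟨hA, fun hw => ⟨fun hi2 => ?_, fun hi2 => (hB hw).2 (by omega)⟩, hC⟩
    rcases Nat.lt_or_ge i s with h' | h'
    · exact (hB hw).1 h'
    · exfalso; have : i = s := by omega
      subst this; exact hse ⟨rfl, by omega⟩

theorem prefA_full (tab : List Int) :
    (List.range' 1 tab.length).foldl (fun p i => p.set i (p.getD (i-1) 0 + tab.getD (i-1) 0))
        ((List.replicate (tab.length+1) (0:Int)).set 0 0) = psumL tab := by
  have := prefA_fold tab tab.length le_rfl
  simpa [psumL] using this

theorem memo0_inv (n : Nat) (pref : List Int) :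
    InvO n pref 1 (List.replicate n (List.replicate n (0:Int))) := by
  have hget : ∀ i j, j < n → pvGet2 (List.replicate n (List.replicate n (0:Int))) i j = 0 := by
    intro i j hj
    unfold pvGet2
    rcases Nat.lt_or_ge i n with hi | hi
    · rw [List.getD_replicate _ hi, List.getD_replicate _ hj]
    · have hrow : (List.replicate n (List.replicate n (0:Int))).getD i [] = [] := by
        rw [List.getD_eq_getElem?_getD, List.getElem?_eq_none (by simpa using hi)]
        rfl
      rw [hrow]
      rfl
  refine ⟨⟨by simp, fun r hr => by simp [List.eq_of_mem_replicate hr]⟩, ?_⟩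
  intro i j hij hj
  constructor
  · intro hw
    have : i = j := by omega
    subst this
    rw [hget i i hj, gS_diag]
    rfl
  · intro _; exact hget i j hj

theorem opt_sum_main : ∀ (tab : List Int), tab ≠ [] → opt_sum tab = opt_sum_alt tab := by
  intro tab hne
  have hn : 1 ≤ tab.length := List.length_pos_iff.mpr hne
  unfold opt_sum opt_sum_alt
  simp only [prefA_full, prefB_eq]
  set n := tab.length with hndef
  set pref := psumL tab with hprefdef
  have hstep : ∀ L m', 1 ≤ L → L < 1 + (n-1) → InvO n pref L m' → InvO n pref (L+1)
      ((fun m len =>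
        (List.range' 0 (n - len)).foldl (fun m start =>
          let e := start + len
          let m1 := pvSet2 m start e (pref.getD (e+1) 0 - pref.getD start 0)
          let best := (List.range' start len).foldl (fun b k =>
            let c := max_abs_val (pvGet2 m1 start k) (pvGet2 m1 (k+1) e)
            match b with
            | none => some c
            | some b0 => some (min_abs_val c b0)) (none : Option Int)
          match best with
          | none => m1
          | some b0 => pvSet2 m1 start e (max_abs_val b0 (pvGet2 m1 start e))) m) m' L) := by
    intro L m' hL1 hL2 hO
    have hI0 : InvI n pref L 0 m' := by
      obtain ⟨hsh, hinv⟩ := hO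
      refine ⟨hsh, fun i j hij hj => ?_⟩
      obtain ⟨hA, hB⟩ := hinv i j hij hj
      exact ⟨hA, fun hw => ⟨fun hc => absurd hc (by omega), fun _ => hB (by omega)⟩,
        fun hw => hB (by omega)⟩
    have := foldl_range'_inv _ (fun s mm => InvI n pref L s mm) (n - L) 0 m' hI0
      (fun s b hs1 hs2 hb => inner_step n pref L s b hL1 (by omega) hb)
    simp only [Nat.zero_add] at this
    obtain ⟨hsh, hinv⟩ := this
    refine ⟨hsh, fun i j hij hj => ?_⟩
    obtain ⟨hA, hB, hC⟩ := hinv i j hij hj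
    constructor
    · intro hw
      rcases Nat.lt_or_ge (j - i) L with h' | h'
      · exact hA h'
      · have hw2 : j - i = L := by omega
        exact (hB hw2).1 (by omega)
    · intro hw; exact hC (by omega)
  have hfin := foldl_range'_inv _ (fun L m => InvO n pref L m) (n-1) 1
    (List.replicate n (List.replicate n (0:Int))) (memo0_inv n pref)
    (fun L m' hL1 hL2 hO => hstep L m' hL1 hL2 hO)
  have h1n : 1 + (n-1) = n := by omega
  rw [h1n] at hfin
  have := (hfin.2 0 (n-1) (by omega) (by omega)).1 (by omega)
  rw [this]
  rfl

-- ===== VERDICT (by name: the statement is the Claim_ definition above) =====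
theorem opt_sum_spec : Claim_equal_opt_sum := by
  intro tab _ hpre
  exact opt_sum_main tab hpre
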